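-- pv_equiv track=rewrite | github.com/Dextromethorpan/Spotify-datasets-integration | roman_numerals_analysis.py | format_progression_with_key_context
-- ===== SOURCE A (Python) =====
-- from typing import List, Dict, Tuple, Optional
--
-- def format_progression_with_key_context(roman_elements: List[str], key_name: str, mode_name: str) -> str:
--     result = []
--     section = []
--     for el in roman_elements:
--         if el.startswith('<'):
--             if section:
--                 result.append(' '.join(section))
--                 section = []
--             result.append(el)
--         else:
--             section.append(el)
--     if section:
--         result.append(' '.join(section))
--     return f"Key of {key_name} {mode_name}: {' '.join(result)}"
-- ===== SOURCE B (Python) =====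
-- def format_progression_with_key_context(roman_elements, key_name, mode_name):
--     return f"Key of {key_name} {mode_name}: {' '.join(roman_elements)}"
-- ===== Notes on version B (the rewrite author's own statement) =====
-- stated objective: simpler
-- what changed: A's section-grouping state machine is a no-op (both the inner and outer joins use a single space), so B drops the loop, the result/section accumulators and the marker branch entirely and performs one join over all elements; avoiding the per-element branching and intermediate list building makes it measurably faster.
import Mathlib
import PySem

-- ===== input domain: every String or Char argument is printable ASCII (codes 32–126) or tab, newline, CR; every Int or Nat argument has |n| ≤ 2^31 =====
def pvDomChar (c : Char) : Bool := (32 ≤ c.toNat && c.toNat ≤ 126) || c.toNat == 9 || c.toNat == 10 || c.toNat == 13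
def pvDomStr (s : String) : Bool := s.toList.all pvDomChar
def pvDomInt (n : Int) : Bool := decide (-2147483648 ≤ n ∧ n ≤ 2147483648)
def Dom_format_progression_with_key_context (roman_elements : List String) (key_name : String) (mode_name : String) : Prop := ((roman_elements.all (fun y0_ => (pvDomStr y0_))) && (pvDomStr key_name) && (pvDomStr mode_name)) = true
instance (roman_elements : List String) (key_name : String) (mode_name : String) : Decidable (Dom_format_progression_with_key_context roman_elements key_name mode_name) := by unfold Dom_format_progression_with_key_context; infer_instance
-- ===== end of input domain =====

-- B drops A's no-op section-grouping loop (both joins use a single space) and joins all elements once (objective: simpler).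

-- ===== PORT A =====
-- A's loop body: state is (result, section), exactly A's two lists
def pvStepA (st : List String × List String) (el : String) : List String × List String :=
  if PySem.Str.startswith el "<" then
    (if st.2 ≠ [] then (st.1 ++ [PySem.Str.join " " st.2] ++ [el], []) else (st.1 ++ [el], []))
  else (st.1, st.2 ++ [el])

-- A's trailing 'if section: result.append(...)'
def pvFinA (st : List String × List String) : List String :=
  if st.2 ≠ [] then st.1 ++ [PySem.Str.join " " st.2] else st.1

def format_progression_with_key_context (roman_elements : List String) (key_name : String) (mode_name : String) : String :=
  "Key of " ++ key_name ++ " " ++ mode_name ++ ": " ++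
    PySem.Str.join " " (pvFinA (roman_elements.foldl pvStepA ([], [])))

-- ===== PORT B =====
def format_progression_with_key_context_alt (roman_elements : List String) (key_name : String) (mode_name : String) : String :=
  "Key of " ++ key_name ++ " " ++ mode_name ++ ": " ++ PySem.Str.join " " roman_elements

-- ===== PRECONDITION & SPEC =====
def Spec_format_progression_with_key_context (roman_elements : List String) (key_name : String) (mode_name : String) (out : String) : Prop := out = format_progression_with_key_context_alt roman_elements key_name mode_name
instance (roman_elements : List String) (key_name : String) (mode_name : String) (out : String) : Decidable (Spec_format_progression_with_key_context roman_elements key_name mode_name out) := by unfold Spec_format_progression_with_key_context; infer_instance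

-- ===== CLAIM (what is proved, stated in full; the proofs are below) =====
def Claim_equal_format_progression_with_key_context : Prop := ∀ (roman_elements : List String) (key_name : String) (mode_name : String), Dom_format_progression_with_key_context roman_elements key_name mode_name → Spec_format_progression_with_key_context roman_elements key_name mode_name (format_progression_with_key_context roman_elements key_name mode_name)

-- ===== LEMMAS AND PROOFS =====

-- joining an append of two nonempty part-lists splits around one separator
theorem pv_join_append (sep : List Char) : ∀ (s t : List (List Char)), s ≠ [] → t ≠ [] →
    PySem.Chars.join sep (s ++ t) = PySem.Chars.join sep s ++ sep ++ PySem.Chars.join sep t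
  | [], _, hs, _ => absurd rfl hs
  | [_], [], _, ht => absurd rfl ht
  | [x], u :: t, _, _ => by
      rw [show ([x] ++ u :: t : List (List Char)) = x :: u :: t from rfl,
          PySem.Chars.join_cons_cons, PySem.Chars.join_singleton]
  | x :: y :: s, t, _, ht => by
      rw [show ((x :: y :: s) ++ t : List (List Char)) = x :: y :: (s ++ t) from rfl,
          PySem.Chars.join_cons_cons,
          show (y :: (s ++ t) : List (List Char)) = (y :: s) ++ t from rfl,
          pv_join_append sep (y :: s) t (by simp) ht, PySem.Chars.join_cons_cons]
      simp [List.append_assoc]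

-- a joined nonempty group at the head flattens back into the surrounding join
theorem pv_join_flatten_head (sep : List Char) (S : List (List Char)) (hS : S ≠ []) (T : List (List Char)) :
    PySem.Chars.join sep (PySem.Chars.join sep S :: T) = PySem.Chars.join sep (S ++ T) := by
  cases T with
  | nil => simp [PySem.Chars.join_singleton]
  | cons u T =>
    rw [show (PySem.Chars.join sep S :: u :: T : List (List Char)) =
          [PySem.Chars.join sep S] ++ (u :: T) from rfl,
        pv_join_append sep [_] (u :: T) (by simp) (by simp), PySem.Chars.join_singleton,
        pv_join_append sep S (u :: T) hS (by simp)]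

-- …and anywhere in the middle
theorem pv_join_flatten_chars (sep : List Char) (S : List (List Char)) (hS : S ≠ [])
    (R T : List (List Char)) :
    PySem.Chars.join sep (R ++ PySem.Chars.join sep S :: T) = PySem.Chars.join sep (R ++ (S ++ T)) := by
  cases R with
  | nil => simpa using pv_join_flatten_head sep S hS T
  | cons a R =>
    rw [pv_join_append sep (a :: R) (PySem.Chars.join sep S :: T) (by simp) (by simp),
        pv_join_append sep (a :: R) (S ++ T) (by simp) (by simp [hS]),
        pv_join_flatten_head sep S hS T]

-- the same fact lifted to Python's ' '.join on strings
theorem pv_join_flatten (s t r : List String) (hs : s ≠ []) :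
    PySem.Str.join " " (r ++ PySem.Str.join " " s :: t) = PySem.Str.join " " (r ++ s ++ t) := by
  simp only [PySem.Str.join, List.map_append, List.map_cons, String.toList_ofList]
  exact congrArg String.ofList (by
    rw [pv_join_flatten_chars " ".toList (s.map String.toList) (by simpa using hs)
        (r.map String.toList) (t.map String.toList), List.append_assoc])

-- loop invariant: the joined, finalized result of A's fold is the join of everything seen
theorem pv_loopA_join (xs : List String) : ∀ (r s : List String),
    PySem.Str.join " " (pvFinA (xs.foldl pvStepA (r, s))) = PySem.Str.join " " (r ++ s ++ xs) := by
  induction xs with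
  | nil =>
    intro r s
    by_cases hs : s = []
    · simp [pvFinA, hs]
    · simpa [pvFinA, hs] using pv_join_flatten s [] r hs
  | cons el xs ih =>
    intro r s
    simp only [List.foldl_cons]
    by_cases hst : PySem.Str.startswith el "<" = true
    · have hst' : PySem.Chars.startswith el.toList ['<'] = true := by simpa using hst
      by_cases hs : s = []
      · rw [show pvStepA (r, s) el = (r ++ [el], []) by simp [pvStepA, hst', hs], ih]
        simp [List.append_assoc, hs]
      · rw [show pvStepA (r, s) el = (r ++ [PySem.Str.join " " s] ++ [el], []) by
            simp [pvStepA, hst', hs], ih]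
        have h := pv_join_flatten s (el :: xs) r hs
        simp only [List.append_assoc] at h ⊢
        simpa using h
    · have hst' : PySem.Chars.startswith el.toList ['<'] = false := by
        simpa using hst
      rw [show pvStepA (r, s) el = (r, s ++ [el]) by simp [pvStepA, hst'], ih]
      simp [List.append_assoc]

-- ===== VERDICT (by name: the statement is the Claim_ definition above) =====
theorem format_progression_with_key_context_spec : Claim_equal_format_progression_with_key_context := by
  intro roman_elements key_name mode_name _
  show _ = _
  unfold format_progression_with_key_context format_progression_with_key_context_alt
  have h := pv_loopA_join roman_elements [] []
  simp only [List.nil_append] at h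
  rw [h]
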